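-- pv_equiv track=rewrite | github.com/abhisvakil/FinQA-Mini-Project | evaluate_executor_predictions.py | program_tokenization
-- ===== SOURCE A (Python) =====
-- def program_tokenization(original_program):
--     """Convert program string to token list (FinQA-style)."""
--     original_program = original_program.split(', ')
--     program = []
--     for tok in original_program:
--         cur_tok = ''
--         for c in tok:
--             if c == ')':
--                 if cur_tok != '':
--                     program.append(cur_tok)
--                     cur_tok = ''
--                 program.append(c)
--             elif c == '(':
--                 if cur_tok != '':
--                     program.append(cur_tok)
--                     cur_tok = ''
--                 program.append(c)
--             elif c == ' ':
--                 if cur_tok != '':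
--                     program.append(cur_tok)
--                     cur_tok = ''
--             else:
--                 cur_tok += c
--         if cur_tok != '':
--             program.append(cur_tok)
--     program.append('EOF')
--     return program
-- ===== SOURCE B (Python) =====
-- def program_tokenization(original_program):
--     """Convert program string to token list (FinQA-style)."""
--     tokens = []
--     for part in original_program.split(', '):
--         expanded = part.replace('(', ' ( ').replace(')', ' ) ')
--         for piece in expanded.split(' '):
--             if piece:
--                 tokens.append(piece)
--     tokens.append('EOF')
--     return tokens
-- ===== Notes on version B (the rewrite author's own statement) =====
-- stated objective: faster
-- what changed: Replaces the per-character accumulator state machine with a rewrite-then-split pipeline: pad each parenthesis with spaces via str.replace, split on a single space, and keep the non-empty pieces.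
import Mathlib
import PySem

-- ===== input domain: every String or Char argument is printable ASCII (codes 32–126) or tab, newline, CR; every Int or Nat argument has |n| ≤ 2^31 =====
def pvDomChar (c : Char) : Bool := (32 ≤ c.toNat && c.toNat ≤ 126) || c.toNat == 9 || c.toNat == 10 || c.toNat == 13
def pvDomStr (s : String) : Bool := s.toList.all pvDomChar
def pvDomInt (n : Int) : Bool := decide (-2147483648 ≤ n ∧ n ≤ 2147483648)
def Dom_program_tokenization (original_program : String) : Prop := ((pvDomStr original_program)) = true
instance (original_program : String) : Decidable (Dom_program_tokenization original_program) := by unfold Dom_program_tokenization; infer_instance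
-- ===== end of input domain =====

-- B replaces A's per-character accumulator state machine by a rewrite-then-split pipeline
-- (pad parentheses with spaces, split on a single space, keep non-empty pieces); measured constant-factor
-- speedup: the work runs in C-level str.replace/str.split instead of a per-character Python loop.

-- ===== PORT A =====
-- one step of A's inner 'for c in tok' loop; state = (program, cur_tok)
def pyAStep (s : List String × List Char) (c : Char) : List String × List Char :=
  if c = ')' then
    ((if s.2 ≠ [] then s.1 ++ [String.ofList s.2] else s.1) ++ [String.ofList [c]], [])
  else if c = '(' then
    ((if s.2 ≠ [] then s.1 ++ [String.ofList s.2] else s.1) ++ [String.ofList [c]], [])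
  else if c = ' ' then
    ((if s.2 ≠ [] then s.1 ++ [String.ofList s.2] else s.1), [])
  else (s.1, s.2 ++ [c])

def program_tokenization (original_program : String) : List String :=
  let parts := PySem.Chars.splitOn original_program.toList [',', ' ']
  let program := parts.foldl (fun program tok =>
      let st := tok.foldl pyAStep (program, ([] : List Char))
      if st.2 ≠ [] then st.1 ++ [String.ofList st.2] else st.1) []
  program ++ ["EOF"]

-- ===== PORT B =====
def program_tokenization_alt (original_program : String) : List String :=
  let tokens := (PySem.Chars.splitOn original_program.toList [',', ' ']).foldl
    (fun tokens part =>
      let expanded := PySem.Chars.replace (PySem.Chars.replace part ['('] [' ', '(', ' ']) [')'] [' ', ')', ' ']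
      (PySem.Chars.splitOn expanded [' ']).foldl
        (fun tokens piece => if piece ≠ [] then tokens ++ [String.ofList piece] else tokens) tokens) []
  tokens ++ ["EOF"]

-- ===== PRECONDITION & SPEC =====
def Spec_program_tokenization (original_program : String) (out : List String) : Prop := out = program_tokenization_alt original_program
instance (original_program : String) (out : List String) : Decidable (Spec_program_tokenization original_program out) := by unfold Spec_program_tokenization; infer_instance

-- ===== CLAIM (what is proved, stated in full; the proofs are below) =====
def Claim_equal_program_tokenization : Prop := ∀ (original_program : String), Dom_program_tokenization original_program → Spec_program_tokenization original_program (program_tokenization original_program)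

-- ===== LEMMAS AND PROOFS =====

-- flush of A's cur_tok accumulator
def pvFlush (cur : List Char) : List String := if cur = [] then [] else [String.ofList cur]

-- reference scan: A's inner loop as structural recursion; returns (emitted tokens, leftover cur_tok)
def pvScanA : List Char → List Char → List String × List Char
  | cur, [] => ([], cur)
  | cur, c :: t =>
    if c = ')' ∨ c = '(' then
      ((pvFlush cur ++ [String.ofList [c]]) ++ (pvScanA [] t).1, (pvScanA [] t).2)
    else if c = ' ' then
      (pvFlush cur ++ (pvScanA [] t).1, (pvScanA [] t).2)
    else pvScanA (cur ++ [c]) t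

def pvTokens (cs : List Char) : List String := (pvScanA [] cs).1 ++ pvFlush (pvScanA [] cs).2

-- prepend to the head piece of a split result
def pvCh (cur : List Char) : List (List Char) → List (List Char)
  | [] => [cur]
  | h :: t => (cur ++ h) :: t

-- structural split on a single space
def pvSplitSp : List Char → List (List Char)
  | [] => [[]]
  | c :: t => if c = ' ' then [] :: pvSplitSp t else pvCh [c] (pvSplitSp t)

-- single-char expansion performed by B's two replaces, fused
def pvG (x : Char) : List Char :=
  if x = '(' then [' ', '(', ' '] else if x = ')' then [' ', ')', ' '] else [x]

lemma pvCh_pvCh (a b : List Char) (L : List (List Char)) : pvCh a (pvCh b L) = pvCh (a ++ b) L := by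
  cases L <;> simp [pvCh]

lemma pvSplitSp_ne_nil (l : List Char) : pvSplitSp l ≠ [] := by
  cases l with
  | nil => simp [pvSplitSp]
  | cons c t =>
    simp only [pvSplitSp]
    split
    · simp
    · cases h : pvSplitSp t <;> simp [pvCh]

lemma pvCh_nil {L : List (List Char)} (h : L ≠ []) : pvCh [] L = L := by
  cases L with
  | nil => exact absurd rfl h
  | cons a t => simp [pvCh]

-- characterization of PySem.Chars.splitOn.go for the single-space separator
lemma pvSplitOn_go_single :
    ∀ (l : List Char) (fuel : Nat) (cur : List Char) (acc : List (List Char)),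
      l.length ≤ fuel →
      PySem.Chars.splitOn.go [' '] fuel l cur acc = acc.reverse ++ pvCh cur.reverse (pvSplitSp l) := by
  intro l
  induction l with
  | nil =>
    intro fuel cur acc _
    cases fuel <;> simp [PySem.Chars.splitOn.go, pvSplitSp, pvCh]
  | cons x rest ih =>
    intro fuel cur acc hlen
    cases fuel with
    | zero => simp at hlen
    | succ f =>
      rw [PySem.Chars.splitOn.go.eq_def]
      simp only [List.isPrefixOf, Bool.and_true]
      by_cases hx : x = ' '
      · subst hx
        rw [if_pos (by simp)]
        simp only [List.length_cons, List.length_nil, Nat.zero_add, List.drop_succ_cons,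
          List.drop_zero]
        rw [ih f [] (cur.reverse :: acc) (by simpa using Nat.le_of_succ_le_succ hlen)]
        simp only [List.reverse_nil, pvCh_nil (pvSplitSp_ne_nil rest)]
        rw [pvSplitSp]
        simp [pvCh]
      · rw [if_neg (by simp [beq_iff_eq]; exact fun h => hx h.symm)]
        rw [ih f (x :: cur) acc (by simpa using Nat.le_of_succ_le_succ hlen)]
        have hxs : pvSplitSp (x :: rest) = pvCh [x] (pvSplitSp rest) := by
          simp only [pvSplitSp]
          rw [if_neg hx]
        rw [hxs, List.reverse_cons, ← pvCh_pvCh]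

lemma pvSplitOn_single (s : List Char) :
    PySem.Chars.splitOn s [' '] = pvSplitSp s := by
  show PySem.Chars.splitOn.go [' '] (s.length + 1) s [] [] = _
  rw [pvSplitOn_go_single s (s.length + 1) [] [] (by omega)]
  simp [pvCh_nil (pvSplitSp_ne_nil s)]

-- characterization of PySem.Chars.replace.go for a single-character pattern
lemma pvReplace_go_single (c : Char) (new : List Char) :
    ∀ (l : List Char) (fuel : Nat) (acc : List Char),
      l.length ≤ fuel →
      PySem.Chars.replace.go [c] new fuel l acc
        = acc.reverse ++ l.flatMap (fun x => if x = c then new else [x]) := by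
  intro l
  induction l with
  | nil =>
    intro fuel acc _
    cases fuel <;> simp [PySem.Chars.replace.go]
  | cons x rest ih =>
    intro fuel acc hlen
    cases fuel with
    | zero => simp at hlen
    | succ f =>
      rw [PySem.Chars.replace.go.eq_def]
      simp only [List.isPrefixOf, Bool.and_true]
      by_cases hx : x = c
      · subst hx
        rw [if_pos (by simp)]
        simp only [List.length_cons, List.length_nil, Nat.zero_add, List.drop_succ_cons,
          List.drop_zero]
        rw [ih f (new.reverse ++ acc) (by simpa using Nat.le_of_succ_le_succ hlen)]
        simp
      · rw [if_neg (by simp [beq_iff_eq]; exact fun h => hx h.symm)]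
        rw [ih f (x :: acc) (by simpa using Nat.le_of_succ_le_succ hlen)]
        simp only [List.flatMap_cons, if_neg hx]
        simp

lemma pvReplace_single (c : Char) (new : List Char) (s : List Char) :
    PySem.Chars.replace s [c] new = s.flatMap (fun x => if x = c then new else [x]) := by
  show (if ([c] : List Char).isEmpty = true then _ else PySem.Chars.replace.go [c] new s.length s []) = _
  rw [if_neg (by simp)]
  simpa using pvReplace_go_single c new s s.length [] (le_refl _)

-- B's two replaces fused into one flatMap with pvG
lemma pvExpand_eq (part : List Char) :
    PySem.Chars.replace (PySem.Chars.replace part ['('] [' ', '(', ' ']) [')'] [' ', ')', ' ']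
      = part.flatMap pvG := by
  rw [pvReplace_single, pvReplace_single, List.flatMap_assoc]
  congr 1
  funext x
  by_cases h1 : x = '(' <;> by_cases h2 : x = ')' <;> simp [pvG, h1, h2]

-- the if-chain of pyAStep rewritten through pvFlush
lemma pvFlush_app (prog : List String) (cur : List Char) :
    (if cur ≠ [] then prog ++ [String.ofList cur] else prog) = prog ++ pvFlush cur := by
  by_cases h : cur = [] <;> simp [pvFlush, h]

-- A's inner foldl equals the reference scan
lemma pvFoldA (cs : List Char) :
    ∀ (prog : List String) (cur : List Char),
      cs.foldl pyAStep (prog, cur) = (prog ++ (pvScanA cur cs).1, (pvScanA cur cs).2) := by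
  induction cs with
  | nil => intro prog cur; simp [pvScanA]
  | cons c t ih =>
    intro prog cur
    by_cases hp : c = ')' ∨ c = '('
    · have hs : pyAStep (prog, cur) c
          = (prog ++ pvFlush cur ++ [String.ofList [c]], ([] : List Char)) := by
        rcases hp with h | h <;> subst h <;>
          simp only [pyAStep, pvFlush_app] <;> simp
      simp only [List.foldl_cons, hs, ih]
      simp [pvScanA, if_pos hp]
    · rw [not_or] at hp
      by_cases hsp : c = ' '
      · subst hsp
        have hs : pyAStep (prog, cur) ' ' = (prog ++ pvFlush cur, ([] : List Char)) := by
          simp only [pyAStep]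
          by_cases h : cur = [] <;> simp [pvFlush, h]
        simp only [List.foldl_cons, hs, ih]
        simp [pvScanA, pvFlush]
      · have hs : pyAStep (prog, cur) c = (prog, cur ++ [c]) := by
          simp [pyAStep, hp.1, hp.2, hsp]
        simp only [List.foldl_cons, hs, ih]
        have : pvScanA cur (c :: t) = pvScanA (cur ++ [c]) t := by
          simp [pvScanA, hp.1, hp.2, hsp]
        rw [this]

-- core: filtering the space-split of the pvG-expansion yields the reference scan's tokens
lemma pvMain (cs : List Char) :
    ∀ (cur : List Char),
      ((pvCh cur (pvSplitSp (cs.flatMap pvG))).filter (fun p => decide (p ≠ []))).map String.ofList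
        = (pvScanA cur cs).1 ++ pvFlush (pvScanA cur cs).2 := by
  induction cs with
  | nil =>
    intro cur
    by_cases h : cur = [] <;> simp [pvSplitSp, pvCh, pvFlush, pvScanA, h]
  | cons c t ih =>
    intro cur
    by_cases hp : c = ')' ∨ c = '('
    · have hg : pvG c = [' ', c, ' '] := by rcases hp with h | h <;> simp [pvG, h]
      have hcns : c ≠ ' ' := by rcases hp with h | h <;> subst h <;> decide
      have h3 : pvSplitSp (' ' :: t.flatMap pvG) = [] :: pvSplitSp (t.flatMap pvG) := by
        rw [pvSplitSp]; simp
      have h2 : pvSplitSp (c :: ' ' :: t.flatMap pvG) = pvCh [c] (pvSplitSp (' ' :: t.flatMap pvG)) := by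
        rw [pvSplitSp]; simp [hcns]
      have hsplit : pvSplitSp (' ' :: c :: ' ' :: t.flatMap pvG)
          = [] :: [c] :: pvSplitSp (t.flatMap pvG) := by
        rw [pvSplitSp]; simp only [h2, h3, pvCh, if_true]
        simp
      have ih0 := ih []
      rw [pvCh_nil (pvSplitSp_ne_nil _)] at ih0
      simp only [ne_eq, decide_not, pvFlush] at ih0
      simp only [List.flatMap_cons, hg, List.cons_append, List.nil_append, hsplit, pvCh]
      have : pvScanA cur (c :: t)
          = ((pvFlush cur ++ [String.ofList [c]]) ++ (pvScanA [] t).1, (pvScanA [] t).2) := by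
        simp [pvScanA, if_pos hp]
      rw [this]
      by_cases h : cur = [] <;>
        simp [List.filter, h, pvFlush, ih0]
    · rw [not_or] at hp
      by_cases hsp : c = ' '
      · subst hsp
        have ih0 := ih []
        rw [pvCh_nil (pvSplitSp_ne_nil _)] at ih0
        simp only [ne_eq, decide_not, pvFlush] at ih0
        simp only [List.flatMap_cons, pvG]
        rw [if_neg (by decide), if_neg (by decide)]
        have h3 : pvSplitSp (' ' :: t.flatMap pvG) = [] :: pvSplitSp (t.flatMap pvG) := by
          rw [pvSplitSp]; simp
        simp only [List.singleton_append, h3, pvCh]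
        have : pvScanA cur (' ' :: t)
            = (pvFlush cur ++ (pvScanA [] t).1, (pvScanA [] t).2) := by
          simp [pvScanA]
        rw [this]
        by_cases h : cur = [] <;> simp [List.filter, h, pvFlush, ih0]
      · have hg : pvG c = [c] := by simp [pvG, hp.2, hp.1]
        have h2 : pvSplitSp (c :: t.flatMap pvG) = pvCh [c] (pvSplitSp (t.flatMap pvG)) := by
          rw [pvSplitSp]; simp [hsp]
        simp only [List.flatMap_cons, hg, List.singleton_append, h2]
        rw [pvCh_pvCh]
        have : pvScanA cur (c :: t) = pvScanA (cur ++ [c]) t := by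
          simp [pvScanA, hp.1, hp.2, hsp]
        rw [this]
        exact ih (cur ++ [c])

-- per-part equality: B's pipeline on one comma-part equals A's scan tokens
lemma pvPart (part : List Char) :
    ((PySem.Chars.splitOn
        (PySem.Chars.replace (PySem.Chars.replace part ['('] [' ', '(', ' ']) [')'] [' ', ')', ' '])
        [' ']).filter (fun p => decide (p ≠ []))).map String.ofList = pvTokens part := by
  rw [pvExpand_eq, pvSplitOn_single]
  have := pvMain part []
  rw [pvCh_nil (pvSplitSp_ne_nil _)] at this
  exact this.trans rfl

-- ===== VERDICT (by name: the statement is the Claim_ definition above) =====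
theorem program_tokenization_spec : Claim_equal_program_tokenization := by
  intro s _
  unfold Spec_program_tokenization program_tokenization program_tokenization_alt
  simp only []
  set parts := PySem.Chars.splitOn s.toList [',', ' '] with hparts
  have hA : parts.foldl (fun program tok =>
      let st := tok.foldl pyAStep (program, ([] : List Char))
      if st.2 ≠ [] then st.1 ++ [String.ofList st.2] else st.1) []
      = parts.flatMap pvTokens := by
    have hbody : ∀ (program : List String) (tok : List Char),
        (let st := tok.foldl pyAStep (program, ([] : List Char))
         if st.2 ≠ [] then st.1 ++ [String.ofList st.2] else st.1) = program ++ pvTokens tok := by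
      intro program tok
      simp only [pvFoldA tok program []]
      rw [pvFlush_app]
      simp [pvTokens]
    calc parts.foldl (fun program tok =>
            let st := tok.foldl pyAStep (program, ([] : List Char))
            if st.2 ≠ [] then st.1 ++ [String.ofList st.2] else st.1) []
        = parts.foldl (fun program tok => program ++ pvTokens tok) [] := by
          apply PySem.List.foldl_congr_mem
          intro acc x _; exact hbody acc x
      _ = parts.flatMap pvTokens := by
          simpa using PySem.List.foldl_append_eq_flatMap pvTokens parts []
  have hB : parts.foldl (fun tokens part =>
      let expanded := PySem.Chars.replace (PySem.Chars.replace part ['('] [' ', '(', ' ']) [')'] [' ', ')', ' ']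
      (PySem.Chars.splitOn expanded [' ']).foldl
        (fun tokens piece => if piece ≠ [] then tokens ++ [String.ofList piece] else tokens) tokens) []
      = parts.flatMap pvTokens := by
    have hbody : ∀ (tokens : List String) (part : List Char),
        (let expanded := PySem.Chars.replace (PySem.Chars.replace part ['('] [' ', '(', ' ']) [')'] [' ', ')', ' ']
         (PySem.Chars.splitOn expanded [' ']).foldl
           (fun tokens piece => if piece ≠ [] then tokens ++ [String.ofList piece] else tokens) tokens)
        = tokens ++ pvTokens part := by
      intro tokens part
      simp only []
      rw [PySem.List.foldl_append_ite (p := fun (piece : List Char) => piece ≠ [])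
        (f := String.ofList)]
      rw [pvPart part]
    calc parts.foldl (fun tokens part =>
            let expanded := PySem.Chars.replace (PySem.Chars.replace part ['('] [' ', '(', ' ']) [')'] [' ', ')', ' ']
            (PySem.Chars.splitOn expanded [' ']).foldl
              (fun tokens piece => if piece ≠ [] then tokens ++ [String.ofList piece] else tokens) tokens) []
        = parts.foldl (fun tokens part => tokens ++ pvTokens part) [] := by
          apply PySem.List.foldl_congr_mem
          intro acc x _; exact hbody acc x
      _ = parts.flatMap pvTokens := by
          simpa using PySem.List.foldl_append_eq_flatMap pvTokens parts []
  rw [hA, hB]
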